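-- pv_equiv track=rewrite | github.com/Corten-Browser/FrankenBrowser | orchestration/hooks/post_commit_enforcement.py | get_current_task
-- ===== SOURCE A (Python) =====
-- def get_current_task(tasks: list) -> dict:
--     """Get current task (in_progress or first pending)."""
--     # Find in_progress
--     for task in tasks:
--         if task.get("status") == "in_progress":
--             return task
--
--     # Find first pending
--     for task in tasks:
--         if task.get("status") == "pending":
--             return task
--
--     return {}
-- ===== SOURCE B (Python) =====
-- def get_current_task(tasks: list) -> dict:
--     """Get current task (in_progress or first pending)."""
--     pending = None
--     for task in tasks:
--         status = task.get("status")
--         if status == "in_progress":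
--             return task
--         if status == "pending" and pending is None:
--             pending = task
--     return pending if pending is not None else {}
-- ===== Notes on version B (the rewrite author's own statement) =====
-- stated objective: simpler
-- what changed: A's two sequential scans (first for in_progress, then for pending) are fused into one pass that returns an in_progress task immediately and remembers the first pending task for the fallback.
import Mathlib
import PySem

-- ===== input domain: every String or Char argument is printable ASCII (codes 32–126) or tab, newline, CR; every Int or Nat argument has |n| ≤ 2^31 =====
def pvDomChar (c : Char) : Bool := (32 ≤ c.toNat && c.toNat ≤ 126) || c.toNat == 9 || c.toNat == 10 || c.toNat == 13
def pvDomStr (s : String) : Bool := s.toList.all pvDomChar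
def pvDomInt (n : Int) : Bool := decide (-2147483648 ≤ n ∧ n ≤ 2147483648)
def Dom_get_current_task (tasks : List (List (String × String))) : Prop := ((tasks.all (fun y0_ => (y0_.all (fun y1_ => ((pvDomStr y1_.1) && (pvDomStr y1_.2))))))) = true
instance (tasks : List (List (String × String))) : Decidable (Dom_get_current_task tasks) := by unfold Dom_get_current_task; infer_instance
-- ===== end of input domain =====

-- B fuses A's two sequential scans into one pass that returns an in_progress task
-- immediately and remembers the first pending task as fallback (objective: simpler).


-- shared primitive: task.get("status") — first-match lookup in the association list
def pvStatus (task : List (String × String)) : Option String :=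
  (PySem.Dict.mk task).get? "status"

-- ===== PORT A =====
-- first loop: find the first task whose status is `target`
def gctFind (target : String) : List (List (String × String)) → Option (List (String × String))
  | [] => none
  | t :: rest => if pvStatus t == some target then some t else gctFind target rest

def get_current_task (tasks : List (List (String × String))) : List (String × String) :=
  match gctFind "in_progress" tasks with
  | some t => t
  | none =>
    match gctFind "pending" tasks with
    | some t => t
    | none => []

-- ===== PORT B =====
-- single pass carrying the remembered first-pending task
def gctAltGo (pending : Option (List (String × String))) :
    List (List (String × String)) → List (String × String)
  | [] => match pending with | some p => p | none => []
  | t :: rest =>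
    let status := pvStatus t
    if status == some "in_progress" then t
    else if status == some "pending" && pending.isNone then gctAltGo (some t) rest
    else gctAltGo pending rest

def get_current_task_alt (tasks : List (List (String × String))) : List (String × String) :=
  gctAltGo none tasks

-- ===== PRECONDITION & SPEC =====
def Spec_get_current_task (tasks : List (List (String × String))) (out : List (String × String)) : Prop := out = get_current_task_alt tasks
instance (tasks : List (List (String × String))) (out : List (String × String)) : Decidable (Spec_get_current_task tasks out) := by unfold Spec_get_current_task; infer_instance

-- ===== CLAIM (what is proved, stated in full; the proofs are below) =====
def Claim_equal_get_current_task : Prop := ∀ (tasks : List (List (String × String))), Dom_get_current_task tasks → Spec_get_current_task tasks (get_current_task tasks)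

-- ===== LEMMAS AND PROOFS =====
-- invariant of B's loop: it computes A's two-scan result with `pending` pre-seeding the fallback
theorem gctAltGo_spec (tasks : List (List (String × String)))
    (pending : Option (List (String × String))) :
    gctAltGo pending tasks =
      match gctFind "in_progress" tasks with
      | some t => t
      | none =>
        match pending with
        | some p => p
        | none => match gctFind "pending" tasks with | some t => t | none => [] := by
  induction tasks generalizing pending with
  | nil => cases pending <;> simp [gctAltGo, gctFind]
  | cons t rest ih =>
    simp only [gctAltGo, gctFind]
    by_cases h1 : pvStatus t == some "in_progress"
    · simp [h1]
    · by_cases h2 : pvStatus t == some "pending"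
      · cases pending with
        | none => simp [h1, h2, ih]
        | some p => simp [h1, h2, ih]
      · cases pending with
        | none => simp [h1, h2, ih]
        | some p => simp [h1, h2, ih]

-- ===== VERDICT (by name: the statement is the Claim_ definition above) =====
theorem get_current_task_spec : Claim_equal_get_current_task := by
  intro tasks _
  unfold Spec_get_current_task get_current_task get_current_task_alt
  rw [gctAltGo_spec]
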